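-- pv_equiv track=rewrite | github.com/Kingstblib46/WinterCamp | Simple/3.py | solution
-- ===== SOURCE A (Python) =====
-- def solution(numbers):
--     """
--     计算从每个组中选择一个数字，使得所有选中数字的和为偶数的组合数量。
--
--     参数:
--         numbers (List[int]): 一个由整数构成的列表，每个整数代表一个数字组（数字从'1'到'9'）。
--
--     返回:
--         int: 满足条件的选择方法总数。
--     """
--     # 初始化偶数和组合数为1，奇数和组合数为0
--     even_count = 1
--     odd_count = 0
--
--     for group in numbers:
--         # 将组的整数转换为数字列表
--         digits = [int(d) for d in str(group)]
--
--         # 计算当前组中偶数和奇数的数量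
--         group_even = sum(1 for d in digits if d % 2 == 0)
--         group_odd = len(digits) - group_even
--
--         # 更新组合计数
--         new_even = even_count * group_even + odd_count * group_odd
--         new_odd = even_count * group_odd + odd_count * group_even
--
--         even_count, odd_count = new_even, new_odd
--
--     return even_count
-- ===== SOURCE B (Python) =====
-- def solution(numbers):
--     # Generating-function form: walk the groups back-to-front keeping two
--     # independent products prod(len) and prod(len - 2*odd) over the decimal
--     # string of each group, then return their half-sum.  No per-digit int()
--     # parsing and no coupled even/odd DP state.
--     total = 1
--     diff = 1
--     for group in reversed(numbers):
--         s = str(group)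
--         odd = sum(ch in "13579" for ch in s)
--         total *= len(s)
--         diff *= len(s) - 2 * odd
--     return (total + diff) // 2
-- ===== Notes on version B (the rewrite author's own statement) =====
-- stated objective: alternative
-- what changed: Replaces the coupled even/odd DP over parsed digit lists with a reversed single pass over each group's decimal string keeping two independent products prod(len) and prod(len-2*odd_chars), returning their half-sum (generating-function identity at x=1 and x=-1).
-- outside the precondition, e.g. on solution([-3]): A raises ValueError, B returns 1
import Mathlib
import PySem

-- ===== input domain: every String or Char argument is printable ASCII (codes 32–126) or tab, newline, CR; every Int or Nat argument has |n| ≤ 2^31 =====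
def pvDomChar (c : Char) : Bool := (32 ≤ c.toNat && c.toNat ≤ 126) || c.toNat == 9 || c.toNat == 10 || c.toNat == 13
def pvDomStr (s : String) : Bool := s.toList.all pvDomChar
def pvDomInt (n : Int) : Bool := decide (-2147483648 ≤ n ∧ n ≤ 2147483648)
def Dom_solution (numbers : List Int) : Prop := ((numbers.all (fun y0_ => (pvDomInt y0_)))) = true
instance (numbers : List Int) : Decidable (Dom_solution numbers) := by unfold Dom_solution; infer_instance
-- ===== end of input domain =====

-- B walks the groups in reverse over each group's decimal STRING, keeping two independent
-- products prod(len) and prod(len - 2*odd chars), and returns their half-sum — replacing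
-- A's coupled even/odd DP over parsed digit lists.

-- ===== PORT A =====
-- digits = [int(d) for d in str(group)]  (exact for group ≥ 0: str(group) is then all ASCII digits)
def pvDigits (n : Int) : List Int :=
  (PySem.Int.toChars n).map (fun c => ((c.toNat : Int) - 48))

def solution (numbers : List Int) : Int :=
  (numbers.foldl (fun (st : Int × Int) group =>
    let digits := pvDigits group
    let groupEven : Int := (digits.countP (fun d => PySem.Int.mod d 2 == 0) : Nat)
    let groupOdd : Int := (digits.length : Int) - groupEven
    (st.1 * groupEven + st.2 * groupOdd, st.1 * groupOdd + st.2 * groupEven))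
    (1, 0)).1

-- ===== PORT B =====
def solution_alt (numbers : List Int) : Int :=
  let td := numbers.reverse.foldl (fun (st : Int × Int) group =>
    let s := PySem.Int.toChars group
    let odd : Int := (s.countP (fun ch => "13579".toList.contains ch) : Nat)
    (st.1 * (s.length : Int), st.2 * ((s.length : Int) - 2 * odd)))
    (1, 1)
  PySem.Int.floordiv (td.1 + td.2) 2

-- ===== PRECONDITION & SPEC =====
-- Pre_ excludes lists containing a negative number: there str(group) starts with '-' and
-- int('-') raises ValueError in A.
def Pre_solution (numbers : List Int) : Prop := ∀ n ∈ numbers, 0 ≤ n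
instance (numbers : List Int) : Decidable (Pre_solution numbers) := by unfold Pre_solution; infer_instance
def pvWitness_solution : List Int := [12, 3, 40]

def Spec_solution (numbers : List Int) (out : Int) : Prop := out = solution_alt numbers
instance (numbers : List Int) (out : Int) : Decidable (Spec_solution numbers out) := by unfold Spec_solution; infer_instance

-- ===== CLAIM =====
def Claim_equal_solution : Prop := ∀ (numbers : List Int), Dom_solution numbers → Pre_solution numbers → Spec_solution numbers (solution numbers)

-- ===== LEMMAS AND PROOFS =====

-- per-group quantities used by the proofs
def pvLen (g : Int) : Int := ((PySem.Int.toChars g).length : Int)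
def pvOdd (g : Int) : Int := ((PySem.Int.toChars g).countP (fun ch => "13579".toList.contains ch) : Nat)
def pvEvenCnt (g : Int) : Int := ((pvDigits g).countP (fun d => PySem.Int.mod d 2 == 0) : Nat)

theorem pv_digitChar_mem (m : Nat) (hm : m < 10) :
    Nat.digitChar m ∈ ['0','1','2','3','4','5','6','7','8','9'] := by
  interval_cases m <;> decide

-- every character produced by Nat.toDigitsCore is a decimal digit or came from the accumulator
theorem pv_mem_toDigitsCore (f : Nat) : ∀ (n : Nat) (acc : List Char) (c : Char),
    c ∈ Nat.toDigitsCore 10 f n acc →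
    c ∈ acc ∨ c ∈ ['0','1','2','3','4','5','6','7','8','9'] := by
  induction f with
  | zero => intro n acc c h; simp [Nat.toDigitsCore] at h; exact Or.inl h
  | succ f ih =>
      intro n acc c h
      have hd : Nat.digitChar (n % 10) ∈ ['0','1','2','3','4','5','6','7','8','9'] :=
        pv_digitChar_mem _ (Nat.mod_lt _ (by norm_num))
      simp only [Nat.toDigitsCore] at h
      split at h
      · rcases List.mem_cons.mp h with h1 | h1
        · exact Or.inr (h1 ▸ hd)
        · exact Or.inl h1
      · rcases ih (n / 10) (Nat.digitChar (n % 10) :: acc) c h with h2 | h2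
        · rcases List.mem_cons.mp h2 with h1 | h1
          · exact Or.inr (h1 ▸ hd)
          · exact Or.inl h1
        · exact Or.inr h2

theorem pv_mem_toChars {g : Int} (hg : 0 ≤ g) {c : Char} (hc : c ∈ PySem.Int.toChars g) :
    c ∈ ['0','1','2','3','4','5','6','7','8','9'] := by
  unfold PySem.Int.toChars Nat.toDigits at hc
  rw [if_neg (by omega)] at hc
  rcases pv_mem_toDigitsCore (g.toNat + 1) g.toNat [] c hc with h | h
  · simp at h
  · exact h

-- on digit characters, A's even test is the negation of B's odd-char test
theorem pv_even_eq_not_odd {c : Char} (h : c ∈ ['0','1','2','3','4','5','6','7','8','9']) :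
    (PySem.Int.mod ((c.toNat : Int) - 48) 2 == 0) = !("13579".toList.contains c) := by
  fin_cases h <;> decide

-- A's even count per group: length minus odd-char count
theorem pv_evenCnt_eq {g : Int} (hg : 0 ≤ g) : pvEvenCnt g = pvLen g - pvOdd g := by
  unfold pvEvenCnt pvDigits pvLen pvOdd
  rw [List.countP_map]
  have hcong : (PySem.Int.toChars g).countP
      ((fun d => PySem.Int.mod d 2 == 0) ∘ (fun c => ((c.toNat : Int) - 48)))
      = (PySem.Int.toChars g).countP (fun ch => !("13579".toList.contains ch)) := by
    apply List.countP_congr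
    intro c hc
    simp only [Function.comp_apply, pv_even_eq_not_odd (pv_mem_toChars hg hc)]
  rw [hcong]
  have h2 := List.length_eq_countP_add_countP (l := PySem.Int.toChars g)
    (p := fun ch => "13579".toList.contains ch)
  simp only [decide_not, Bool.decide_eq_true] at h2
  omega

-- closed forms of the two folds as products over the list
def pvP (l : List Int) : Int := (l.map pvLen).prod
def pvD (l : List Int) : Int := (l.map (fun g => pvLen g - 2 * pvOdd g)).prod

theorem pv_foldB (l : List Int) (a b : Int) :
    l.foldl (fun (st : Int × Int) group =>
      let s := PySem.Int.toChars group
      let odd : Int := (s.countP (fun ch => "13579".toList.contains ch) : Nat)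
      (st.1 * (s.length : Int), st.2 * ((s.length : Int) - 2 * odd))) (a, b)
    = (a * pvP l, b * pvD l) := by
  induction l generalizing a b with
  | nil => simp [pvP, pvD]
  | cons g rest ih =>
      simp only [List.foldl_cons, ih, pvP, pvD, List.map_cons, List.prod_cons]
      exact Prod.ext (by simp [pvLen]; ring) (by simp [pvLen, pvOdd]; ring)

theorem pv_foldA (l : List Int) (hl : ∀ n ∈ l, 0 ≤ n) (e o : Int) :
    l.foldl (fun (st : Int × Int) group =>
      let digits := pvDigits group
      let groupEven : Int := (digits.countP (fun d => PySem.Int.mod d 2 == 0) : Nat)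
      let groupOdd : Int := (digits.length : Int) - groupEven
      (st.1 * groupEven + st.2 * groupOdd, st.1 * groupOdd + st.2 * groupEven)) (e, o)
    = (((e + o) * pvP l + (e - o) * pvD l) / 2,
       ((e + o) * pvP l - (e - o) * pvD l) / 2) := by
  induction l generalizing e o with
  | nil => simp [pvP, pvD]; omega
  | cons g rest ih =>
      simp only [List.foldl_cons]
      have hg : 0 ≤ g := hl g (by simp)
      have hE : ((pvDigits g).countP (fun d => PySem.Int.mod d 2 == 0) : Int) = pvLen g - pvOdd g :=
        pv_evenCnt_eq hg
      have hLen : ((pvDigits g).length : Int) = pvLen g := by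
        simp [pvDigits, pvLen]
      rw [ih (fun n hn => hl n (by simp [hn]))]
      simp only [hE, hLen, pvP, pvD, List.map_cons, List.prod_cons]
      congr 1 <;> · congr 1; ring

-- ===== VERDICT =====
theorem solution_spec : Claim_equal_solution := by
  intro numbers _ hpre
  unfold Spec_solution solution solution_alt
  rw [pv_foldA numbers hpre 1 0, pv_foldB]
  simp only [pvP, pvD]
  rw [show (numbers.reverse.map pvLen) = (numbers.map pvLen).reverse by simp,
      show (numbers.reverse.map (fun g => pvLen g - 2 * pvOdd g))
          = (numbers.map (fun g => pvLen g - 2 * pvOdd g)).reverse by simp,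
      List.prod_reverse, List.prod_reverse]
  set P := (numbers.map pvLen).prod
  set D := (numbers.map (fun g => pvLen g - 2 * pvOdd g)).prod
  rw [PySem.Int.floordiv_eq_ediv_of_pos (by norm_num)]
  omega
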